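-- pv_equiv track=rewrite | github.com/MrBrantCode/unitest_baseline | mut_generate/mist_train_taco/taco_4947/solution.py | find_max_permutation_value
-- ===== SOURCE A (Python) =====
-- def find_max_permutation_value(N, A):
--     """
--     Finds the maximum value across all permutations of the array A.
--
--     Parameters:
--     N (int): The size of the array A.
--     A (list of int): The array containing distinct positive integers.
--
--     Returns:
--     int: The maximum possible value across all permutations of A.
--     """
--     A.sort()
--     prefix = [0] * N
--     for i in range(N):
--         prefix[i] = A[i]
--         if i > 0:
--             prefix[i] += prefix[i - 1]
--     dp = [-1] * N
--     dp[N - 1] = 0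
--     for i in range(N - 2, -1, -1):
--         for j in range(i + 1, N):
--             dp[i] = max(dp[i], dp[j] + (prefix[j - 1] if j - 1 >= 0 else 0) - prefix[i] + A[j] % A[i])
--     return dp[0] + A[0]
-- ===== SOURCE B (Python) =====
-- def find_max_permutation_value(N, A):
--     # Top-down memoized evaluation of the chain DP with an explicit worklist stack
--     # (no dp array, no index-written prefix table; avoids Python's recursion limit).
--     # Note: A.sort() mutates the caller's list, as in the original.
--     A.sort()
--     prefix = []
--     total = 0
--     for x in A[:N]:
--         total += x
--         prefix.append(total)
--     memo = {}
--     stack = [0]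
--     while stack:
--         i = stack.pop()
--         if i in memo:
--             continue
--         todo = [j for j in range(i + 1, N) if j not in memo]
--         if todo:
--             stack.append(i)
--             stack.extend(todo)
--         else:
--             pi = prefix[i]
--             ai = A[i]
--             b = 0 if i == N - 1 else -1
--             for j in range(i + 1, N):
--                 t = memo[j] + prefix[j - 1] - pi + A[j] % ai
--                 if t > b:
--                     b = t
--             memo[i] = b
--     return memo[0] + A[0]
-- ===== Notes on version B (the rewrite author's own statement) =====
-- stated objective: alternative
-- what changed: A's bottom-up dp array (backward index loop with in-place max writes) and index-filled prefix table are replaced by top-down memoized evaluation: a dict memo driven by an explicit worklist stack that discovers and resolves subproblems on demand, plus a prefix list built by appending a running total; same recurrence, different evaluation strategy and data structures.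
import Mathlib
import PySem

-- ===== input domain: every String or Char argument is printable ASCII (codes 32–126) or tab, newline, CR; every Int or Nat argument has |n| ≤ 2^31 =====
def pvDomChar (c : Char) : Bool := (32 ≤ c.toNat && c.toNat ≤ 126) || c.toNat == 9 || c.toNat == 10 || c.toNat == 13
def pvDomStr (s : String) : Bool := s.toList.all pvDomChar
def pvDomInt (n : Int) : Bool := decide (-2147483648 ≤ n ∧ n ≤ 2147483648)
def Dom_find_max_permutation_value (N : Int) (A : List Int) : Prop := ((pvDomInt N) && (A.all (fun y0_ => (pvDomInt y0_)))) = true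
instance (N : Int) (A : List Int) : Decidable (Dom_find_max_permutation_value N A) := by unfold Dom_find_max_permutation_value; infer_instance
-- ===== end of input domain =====

-- B replaces A's bottom-up dp array (backward index loop, in-place max writes) and its
-- index-filled prefix table by top-down memoized evaluation: a memo dict driven by an
-- explicit worklist stack, and a prefix list appended from a running total. Equivalence
-- is about the RETURN value (both Pythons sort A in place, identically).

-- ===== PORT A =====
-- body of A's prefix-filling loop: prefix[i] = A[i]; if i > 0: prefix[i] += prefix[i-1]
def fillF (s : List Int) (p : List Int) (i : Int) : List Int :=
  let p1 := PySem.List.pySetD p i (PySem.List.pyGetD s i 0)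
  if i > 0 then
    PySem.List.pySetD p1 i (PySem.List.pyGetD p1 i 0 + PySem.List.pyGetD p1 (i - 1) 0)
  else p1

-- body of A's inner loop: dp[i] = max(dp[i], dp[j] + (prefix[j-1] if j-1>=0 else 0) - prefix[i] + A[j] % A[i])
def innerA (s P : List Int) (i : Int) (dp : List Int) (j : Int) : List Int :=
  PySem.List.pySetD dp i (max (PySem.List.pyGetD dp i 0)
    (PySem.List.pyGetD dp j 0 + (if j - 1 ≥ 0 then PySem.List.pyGetD P (j - 1) 0 else 0)
      - PySem.List.pyGetD P i 0
      + PySem.Int.mod (PySem.List.pyGetD s j 0) (PySem.List.pyGetD s i 0)))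

-- A's inner loop: for j in range(i+1, N)
def outerA (s P : List Int) (N : Int) (dp : List Int) (i : Int) : List Int :=
  (PySem.List.pyRange (i + 1) N 1).foldl (innerA s P i) dp

def find_max_permutation_value (N : Int) (A : List Int) : Int :=
  let s := PySem.List.sorted A (fun x => x) false
  let pre := (PySem.List.pyRange 0 N 1).foldl (fillF s) (List.replicate N.toNat 0)
  let dp0 := PySem.List.pySetD (List.replicate N.toNat (-1 : Int)) (N - 1) 0
  let dp := (PySem.List.pyRange (N - 2) (-1) (-1)).foldl (outerA s pre N) dp0
  PySem.List.pyGetD dp 0 0 + PySem.List.pyGetD s 0 0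

-- ===== PORT B =====
-- body of B's prefix loop: total += x; prefix.append(total)  (state = (prefix, total))
def psF (pt : List Int × Int) (x : Int) : List Int × Int := (pt.1 ++ [pt.2 + x], pt.2 + x)

-- B's while loop over (stack, memo), fuel-bounded (fuel only makes the recursion
-- structural; it is never exhausted on the inputs the claim covers).
-- memo[j] is read with default 0; inside Pre_ the key is always present.
def loopB (s pre : List Int) (N : Int) : Nat → List Int → PySem.Dict Int Int → PySem.Dict Int Int
  | 0, _, memo => memo
  | f + 1, stack, memo =>
    match stack.getLast? with
    | none => memo                                  -- while stack: exits
    | some i =>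
      let rest := stack.dropLast                    -- i = stack.pop()
      if PySem.Dict.contains memo i then loopB s pre N f rest memo
      else
        let todo := (PySem.List.pyRange (i + 1) N 1).filter
          (fun j => !(PySem.Dict.contains memo j))
        if !todo.isEmpty then
          loopB s pre N f ((rest ++ [i]) ++ todo) memo   -- stack.append(i); stack.extend(todo)
        else
          let pi := PySem.List.pyGetD pre i 0      -- pi = prefix[i], hoisted out of the j-loop
          let ai := PySem.List.pyGetD s i 0        -- ai = A[i], hoisted out of the j-loop
          let b := (PySem.List.pyRange (i + 1) N 1).foldl
            (fun b j =>
              let t := PySem.Dict.getD memo j 0 + PySem.List.pyGetD pre (j - 1) 0 - pi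
                + PySem.Int.mod (PySem.List.pyGetD s j 0) ai
              if t > b then t else b)
            (if i == N - 1 then (0 : Int) else -1)
          loopB s pre N f rest (PySem.Dict.insert memo i b)

def find_max_permutation_value_alt (N : Int) (A : List Int) : Int :=
  let s := PySem.List.sorted A (fun x => x) false
  let pre := ((PySem.List.slice s none (some N)).foldl psF ([], 0)).1
  let memo := loopB s pre N (N.toNat + 4) [0] PySem.Dict.empty
  PySem.Dict.getD memo 0 0 + PySem.List.pyGetD s 0 0

-- ===== PRECONDITION & SPEC =====
-- Pre_ excludes exactly the inputs where the Python A raises: N < 1 or N > len(A)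
-- (IndexError), and a zero among the first N-1 sorted elements (ZeroDivisionError).
def Pre_find_max_permutation_value (N : Int) (A : List Int) : Prop :=
  1 ≤ N ∧ N ≤ (A.length : Int) ∧
    ∀ x ∈ (PySem.List.sorted A (fun x => x) false).take (N.toNat - 1), x ≠ 0
instance (N : Int) (A : List Int) : Decidable (Pre_find_max_permutation_value N A) := by
  unfold Pre_find_max_permutation_value; infer_instance

def pvWitness_find_max_permutation_value : Int × List Int := (3, [5, 2, 9])

def Spec_find_max_permutation_value (N : Int) (A : List Int) (out : Int) : Prop := out = find_max_permutation_value_alt N A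
instance (N : Int) (A : List Int) (out : Int) : Decidable (Spec_find_max_permutation_value N A out) := by unfold Spec_find_max_permutation_value; infer_instance

-- ===== CLAIM (what is proved, stated in full; the proofs are below) =====
def Claim_equal_find_max_permutation_value : Prop := ∀ (N : Int) (A : List Int), Dom_find_max_permutation_value N A → Pre_find_max_permutation_value N A → Spec_find_max_permutation_value N A (find_max_permutation_value N A)

-- ===== LEMMAS AND PROOFS =====

-- prefix sums of xs starting from running total t
def scanSum (t : Int) : List Int → List Int
  | [] => []
  | x :: xs => (t + x) :: scanSum (t + x) xs

theorem length_scanSum (t : Int) (xs : List Int) : (scanSum t xs).length = xs.length := by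
  induction xs generalizing t with
  | nil => rfl
  | cons x xs ih => simp [scanSum, ih]

theorem scanSum_append_singleton (t : Int) (xs : List Int) (y : Int) :
    scanSum t (xs ++ [y]) = scanSum t xs ++ [t + xs.sum + y] := by
  induction xs generalizing t with
  | nil => simp [scanSum]
  | cons x xs ih => simp [scanSum, ih]; ring_nf

theorem scanSum_getD_last (t : Int) (xs : List Int) (d : Int) (h : xs ≠ []) :
    (scanSum t xs).getD (xs.length - 1) d = t + xs.sum := by
  induction xs generalizing t with
  | nil => simp at h
  | cons x xs ih =>
    cases xs with
    | nil => simp [scanSum]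
    | cons y ys =>
      have := ih (t + x) (by simp)
      simp only [scanSum, List.length_cons] at *
      simpa [Nat.succ_sub_one, add_assoc] using this

-- B's prefix loop computes the running prefix sums
theorem psF_spec (xs : List Int) (acc : List Int) (t : Int) :
    xs.foldl psF (acc, t) = (acc ++ scanSum t xs, t + xs.sum) := by
  induction xs generalizing acc t with
  | nil => simp [scanSum]
  | cons x xs ih => simp [psF, scanSum, ih, add_assoc]

-- A's fill loop computes the same prefix sums into the preallocated array
theorem fillA_spec (s : List Int) (n : Nat) (hns : n ≤ s.length) :
    ∀ m, m ≤ n →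
      (PySem.List.pyRange 0 (m : Int) 1).foldl (fillF s) (List.replicate n 0)
        = scanSum 0 (s.take m) ++ List.replicate (n - m) 0 := by
  intro m
  induction m with
  | zero =>
    intro _
    rw [show ((0 : Nat) : Int) = 0 by norm_num, PySem.List.pyRange_one_eq_nil (by omega)]
    simp [scanSum]
  | succ m ih =>
    intro hm
    have hmn : m ≤ n := by omega
    have hms : m < s.length := by omega
    have hXlen : (scanSum 0 (s.take m)).length = m := by
      rw [length_scanSum, List.length_take]; omega
    rw [show ((m + 1 : Nat) : Int) = (m : Int) + 1 by push_cast; ring,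
      PySem.List.pyRange_one_succ_right (by omega), List.foldl_append, ih hmn]
    rw [List.foldl_cons, List.foldl_nil]
    unfold fillF
    rw [PySem.List.pySetD_natCast, PySem.List.pyGetD_natCast]
    have hrep : List.replicate (n - m) (0 : Int) = 0 :: List.replicate (n - m - 1) 0 := by
      rw [← List.replicate_succ]; congr 1; omega
    rw [hrep, List.set_append]
    rw [if_neg (by omega : ¬ m < (scanSum 0 (s.take m)).length)]
    rw [show m - (scanSum 0 (s.take m)).length = 0 by omega]
    simp only [List.set_cons_zero]
    by_cases hm0 : m = 0
    · subst hm0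
      rw [if_neg (by omega : ¬ ((0:Nat):Int) > 0)]
      rw [List.take_succ, List.take_zero]
      rw [List.getElem?_eq_getElem hms]
      simp [scanSum, List.getElem?_eq_getElem hms]
    · rw [if_pos (by omega : ((m:Nat):Int) > 0)]
      rw [PySem.List.pySetD_natCast, PySem.List.pyGetD_natCast]
      rw [show ((m:Nat):Int) - 1 = ((m - 1 : Nat) : Int) by omega, PySem.List.pyGetD_natCast]
      rw [List.getD_append_right (scanSum 0 (s.take m)) _ _ m (by omega), show m - (scanSum 0 (s.take m)).length = 0 by omega]
      rw [List.getD_append (scanSum 0 (s.take m)) _ _ (m-1) (by omega)]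
      have htake : s.take m ≠ [] := by
        have hl : (s.take m).length = m := by rw [List.length_take]; omega
        intro h
        rw [h] at hl
        simp at hl
        omega
      have hlast : (scanSum 0 (s.take m)).getD (m - 1) 0 = 0 + (s.take m).sum := by
        have := scanSum_getD_last 0 (s.take m) 0 htake
        rwa [show (s.take m).length - 1 = m - 1 by rw [List.length_take]; omega] at this
      rw [hlast]
      rw [List.set_append, if_neg (by omega : ¬ m < (scanSum 0 (s.take m)).length),
        show m - (scanSum 0 (s.take m)).length = 0 by omega]
      simp only [List.getD_cons_zero, List.set_cons_zero]
      rw [List.take_succ, List.getElem?_eq_getElem hms,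
        show (some s[m]).toList = [s[m]] from rfl, scanSum_append_singleton, List.append_assoc]
      have hval : s.getD m 0 + (0 + (List.take m s).sum) = 0 + (List.take m s).sum + s[m] := by
        rw [List.getD_eq_getElem _ _ hms]; ring
      rw [hval, show n - (m + 1) = n - m - 1 from by omega]
      rfl

-- the value A's inner loop adds at candidate j, reading the dp array only at j
def termG (s P : List Int) (i : Int) (dp : List Int) (j : Int) : Int :=
  PySem.List.pyGetD dp j 0 + (if j - 1 ≥ 0 then PySem.List.pyGetD P (j - 1) 0 else 0)
    - PySem.List.pyGetD P i 0
    + PySem.Int.mod (PySem.List.pyGetD s j 0) (PySem.List.pyGetD s i 0)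

-- the same candidate value read off a suffix list best = dp[i+1:]
def termB (s P : List Int) (i : Int) (b : Int) (kv : Int × Int) : Int :=
  max b (kv.2 + PySem.List.pyGetD P (i + kv.1) 0 - PySem.List.pyGetD P i 0
    + PySem.Int.mod (PySem.List.pyGetD s (i + 1 + kv.1) 0) (PySem.List.pyGetD s i 0))

-- one pass of A's outer loop expressed on the suffix list
def outerB (s P : List Int) (best : List Int) (i : Int) : List Int :=
  PySem.List.insert best 0 ((PySem.List.enumerate best 0).foldl (termB s P i) (-1))

-- the inner loop only ever writes index i, so it factors into one write of a running max
theorem inner_factor_gen (k : Nat) (G : List Int → Int → Int)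
    (hG : ∀ dp v x, (k : Int) < x → G (PySem.List.pySetD dp (k:Int) v) x = G dp x) :
    ∀ (J : List Int) (dp : List Int), k < dp.length → (∀ j ∈ J, (k : Int) < j) →
      J.foldl (fun dp j => PySem.List.pySetD dp (k:Int) (max (PySem.List.pyGetD dp (k:Int) 0) (G dp j))) dp
        = PySem.List.pySetD dp (k:Int)
            (J.foldl (fun m j => max m (G dp j)) (PySem.List.pyGetD dp (k:Int) 0)) := by
  intro J
  induction J with
  | nil =>
    intro dp hk _
    simp [PySem.List.pySetD_natCast, PySem.List.pyGetD_natCast,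
      List.getElem?_eq_getElem hk, List.getD]
  | cons j J ih =>
    intro dp hk hJ
    have hjk : (k : Int) < j := hJ j (by simp)
    have hgetk : PySem.List.pyGetD (PySem.List.pySetD dp (k:Int) (max (PySem.List.pyGetD dp (k:Int) 0) (G dp j))) (k:Int) 0
        = max (PySem.List.pyGetD dp (k:Int) 0) (G dp j) := by
      rw [PySem.List.pyGetD_pySetD_natCast _ _ _ _ _ hk]; simp
    rw [List.foldl_cons, ih _ (by simp; omega) (fun x hx => hJ x (by simp [hx])), hgetk]
    have hcongr : List.foldl (fun m j' => max m (G (PySem.List.pySetD dp (k:Int) (max (PySem.List.pyGetD dp (k:Int) 0) (G dp j))) j'))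
          (max (PySem.List.pyGetD dp (k:Int) 0) (G dp j)) J
        = List.foldl (fun m j' => max m (G dp j'))
          (max (PySem.List.pyGetD dp (k:Int) 0) (G dp j)) J :=
      PySem.List.foldl_congr_mem J _ _ _ (fun acc x hx => by rw [hG _ _ _ (hJ x (by simp [hx]))])
    rw [hcongr]
    simp [PySem.List.pySetD_natCast, List.set_set]

theorem stepA (s P : List Int) (n : Nat) (k : Nat) (best : List Int) (hkn : k + 1 + best.length = n) :
    outerA s P (n : Int) (List.replicate (k + 1) (-1) ++ best) (k : Int)
      = List.replicate k (-1) ++ (outerB s P best (k : Int)) := by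
  have hdp : k < (List.replicate (k + 1) (-1 : Int) ++ best).length := by simp; omega
  have hG : ∀ (dp : List Int) v (x : Int), (k : Int) < x →
      termG s P (k:Int) (PySem.List.pySetD dp (k:Int) v) x = termG s P (k:Int) dp x := by
    intro dp v x hx
    obtain ⟨m, rfl⟩ : ∃ m : Nat, x = (m : Int) := ⟨x.toNat, by omega⟩
    have hkm : k ≠ m := by omega
    simp [termG, PySem.List.pySetD_natCast, PySem.List.pyGetD_natCast, List.getD,
      List.getElem?_set_ne hkm]
  have hmem : ∀ j ∈ PySem.List.pyRange ((k:Int) + 1) (n:Int) 1, (k:Int) < j := by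
    intro j hj
    rw [PySem.List.mem_pyRange_one] at hj
    omega
  have key := inner_factor_gen k (termG s P (k:Int)) hG (PySem.List.pyRange ((k:Int) + 1) (n:Int) 1)
    (List.replicate (k + 1) (-1) ++ best) hdp hmem
  unfold outerA
  rw [show innerA s P (k:Int) = (fun dp j => PySem.List.pySetD dp (k:Int)
      (max (PySem.List.pyGetD dp (k:Int) 0) (termG s P (k:Int) dp j))) from rfl, key]
  have hdpk : PySem.List.pyGetD (List.replicate (k + 1) (-1 : Int) ++ best) (k:Int) 0 = -1 := by
    rw [PySem.List.pyGetD_natCast, List.getD_append _ _ _ _ (by simp)]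
    simp
  rw [hdpk]
  have hfold : (PySem.List.pyRange ((k:Int) + 1) (n:Int) 1).foldl
        (fun m j => max m (termG s P (k:Int) (List.replicate (k + 1) (-1) ++ best) j)) (-1)
      = (PySem.List.enumerate best 0).foldl (termB s P (k:Int)) (-1) := by
    rw [PySem.List.enumerate_eq_map_pyRange best 0, List.foldl_map]
    rw [PySem.List.pyRange_one ((k:Int)+1) (n:Int), PySem.List.pyRange_one 0 (PySem.List.len best)]
    rw [List.foldl_map, List.foldl_map]
    have hlen : ((n:Int) - ((k:Int) + 1)).toNat = best.length := by omega
    have hlen2 : ((PySem.List.len best : Int) - 0).toNat = best.length := by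
      simp [PySem.List.len_eq]
    rw [hlen, hlen2]
    apply PySem.List.foldl_congr_mem _ _ _ _
    intro acc t ht
    rw [List.mem_range] at ht
    have hread : PySem.List.pyGetD (List.replicate (k+1) (-1 : Int) ++ best) ((k:Int)+1+(t:Int)) 0
        = PySem.List.pyGetD best (t:Int) 0 := by
      rw [show ((k:Int)+1+(t:Int)) = ((k+1+t : Nat):Int) by push_cast; ring,
        PySem.List.pyGetD_natCast, PySem.List.pyGetD_natCast,
        List.getD_append_right _ _ _ _ (by simp)]
      simp
    have hP : PySem.List.pyGetD P ((k:Int)+1+(t:Int)-1) 0 = PySem.List.pyGetD P ((k:Int)+(t:Int)) 0 := by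
      rw [show ((k:Int)+1+(t:Int)-1) = (k:Int)+(t:Int) by ring]
    simp only [termG, termB, zero_add, hread]
    rw [hP]
    have hge : ((k:Int) + 1 + (t:Int) - 1 ≥ 0) := by omega
    rw [if_pos hge]
  rw [hfold]
  unfold outerB
  rw [PySem.List.insert_zero]
  generalize (PySem.List.enumerate best 0).foldl (termB s P (k:Int)) (-1) = b
  rw [PySem.List.pySetD_natCast]
  simp [List.replicate_succ']

theorem length_outerB (s P : List Int) (best : List Int) (i : Int) :
    (outerB s P best i).length = best.length + 1 := by
  simp [outerB, PySem.List.insert_zero]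

theorem loop_eq (s P : List Int) (n : Nat) :
    ∀ (k : Nat) (best : List Int), k + best.length = n →
      (PySem.List.pyRange ((k : Int) - 1) (-1) (-1)).foldl (outerA s P (n : Int))
          (List.replicate k (-1) ++ best)
        = (PySem.List.pyRange ((k : Int) - 1) (-1) (-1)).foldl (outerB s P) best := by
  intro k
  induction k with
  | zero =>
    intro best hbn
    rw [PySem.List.pyRange_neg_one_eq_nil (by omega)]
    simp
  | succ k ih =>
    intro best hbn
    have hc : ((k + 1 : Nat) : Int) - 1 = (k : Int) := by push_cast; ring
    rw [hc, PySem.List.pyRange_neg_one_cons (by omega : (-1 : Int) < (k : Int))]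
    rw [List.foldl_cons, List.foldl_cons]
    rw [stepA s P n k best (by omega)]
    exact ih (outerB s P best (k : Int)) (by rw [length_outerB]; omega)

-- ---- the common value function dval (fuel-defined) ----

def dvalF (s P : List Int) (n : Nat) : Nat → Nat → Int
  | 0, _ => 0
  | f + 1, i =>
    if i = n - 1 then 0
    else (List.range' (i + 1) (n - 1 - i)).foldl
      (fun m j => max m (dvalF s P n f j + P.getD (j - 1) 0 - P.getD i 0
        + PySem.Int.mod (s.getD j 0) (s.getD i 0))) (-1)

def dval (s P : List Int) (n i : Nat) : Int := dvalF s P n (n - i) i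

theorem dvalF_stable (s P : List Int) (n : Nat) :
    ∀ (f i : Nat), i < n → n - i ≤ f → dvalF s P n f i = dval s P n i := by
  intro f
  induction f using Nat.strong_induction_on with
  | _ f ih =>
    intro i hi hf
    match f, hf with
    | 0, hf => exact absurd hf (by omega)
    | f + 1, _ =>
      unfold dval
      rw [show n - i = (n - i - 1) + 1 by omega]
      by_cases hbase : i = n - 1
      · simp [dvalF, hbase]
      · simp only [dvalF, if_neg hbase]
        apply PySem.List.foldl_congr_mem
        intro acc j hj
        rw [List.mem_range'_1] at hj
        have hjn : j < n := by omega
        have h1 : dvalF s P n f j = dval s P n j := ih f (by omega) j hjn (by omega)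
        have h2 : dvalF s P n (n - i - 1) j = dval s P n j :=
          ih (n - i - 1) (by omega) j hjn (by omega)
        rw [h1, h2]

-- the suffix list [dval i, …, dval (n-1)]
def dlist (s P : List Int) (n i : Nat) : List Int :=
  (List.range' i (n - i)).map (fun k => dval s P n k)

theorem dval_last (s P : List Int) (n : Nat) (hn : 1 ≤ n) : dval s P n (n - 1) = 0 := by
  unfold dval
  rw [show n - (n - 1) = 1 by omega]
  simp [dvalF]

theorem dval_eq_range_fold (s P : List Int) (n k : Nat) (hk : k < n) :
    dval s P n k
      = (List.range (n - 1 - k)).foldl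
          (fun m t => max m (dval s P n (k + 1 + t) + P.getD (k + t) 0 - P.getD k 0
            + PySem.Int.mod (s.getD (k + 1 + t) 0) (s.getD k 0)))
          (if k = n - 1 then 0 else -1) := by
  by_cases hbase : k = n - 1
  · rw [if_pos hbase, show n - 1 - k = 0 by omega]
    simp [hbase, dval_last s P n (by omega)]
  · rw [if_neg hbase]
    unfold dval
    rw [show n - k = (n - k - 1) + 1 by omega]
    simp only [dvalF, if_neg hbase]
    rw [List.range'_eq_map_range, List.foldl_map]
    apply PySem.List.foldl_congr_mem
    intro acc t ht
    rw [List.mem_range] at ht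
    rw [dvalF_stable s P n (n - k - 1) (k + 1 + t) (by omega) (by omega),
      show k + 1 + t - 1 = k + t by omega]
    rfl

theorem length_dlist (s P : List Int) (n i : Nat) : (dlist s P n i).length = n - i := by
  simp [dlist]

theorem getD_dlist (s P : List Int) (n i t : Nat) (ht : t < n - i) :
    (dlist s P n i).getD t 0 = dval s P n (i + t) := by
  unfold dlist
  simp [List.getD_eq_getElem?_getD, ht]

theorem outerB_dlist (s P : List Int) (n i : Nat) (hi : i + 1 ≤ n - 1) :
    outerB s P (dlist s P n (i + 1)) (i : Int) = dlist s P n i := by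
  have hlen : (dlist s P n (i + 1)).length = n - 1 - i := by
    rw [length_dlist]; omega
  unfold outerB
  rw [PySem.List.insert_zero]
  have hfold : (PySem.List.enumerate (dlist s P n (i + 1)) 0).foldl (termB s P (i : Int)) (-1)
      = dval s P n i := by
    rw [PySem.List.enumerate_eq_map_pyRange (dlist s P n (i + 1)) 0, List.foldl_map]
    rw [PySem.List.pyRange_one 0 (PySem.List.len (dlist s P n (i + 1))), List.foldl_map]
    have hc : ((PySem.List.len (dlist s P n (i + 1)) : Int) - 0).toNat = n - 1 - i := by
      simp [PySem.List.len_eq, hlen]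
    rw [hc, dval_eq_range_fold s P n i (by omega), if_neg (by omega : ¬ i = n - 1)]
    apply PySem.List.foldl_congr_mem
    intro acc t ht
    rw [List.mem_range] at ht
    unfold termB
    simp only [zero_add]
    have hbt : PySem.List.pyGetD (dlist s P n (i + 1)) ((t : Nat) : Int) 0
        = dval s P n (i + 1 + t) := by
      rw [PySem.List.pyGetD_natCast, getD_dlist s P n (i + 1) t (by omega)]
    rw [hbt,
      show (i : Int) + (t : Int) = ((i + t : Nat) : Int) by push_cast; ring,
      show (i : Int) + 1 + (t : Int) = ((i + 1 + t : Nat) : Int) by push_cast; ring,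
      PySem.List.pyGetD_natCast, PySem.List.pyGetD_natCast,
      PySem.List.pyGetD_natCast s, PySem.List.pyGetD_natCast s]
  rw [hfold]
  unfold dlist
  rw [show n - i = (n - i - 1) + 1 by omega, List.range'_succ, List.map_cons,
    show n - i - 1 = n - (i + 1) by omega]

theorem Afold_dlist (s P : List Int) (n : Nat) :
    ∀ k, k ≤ n - 1 →
      (PySem.List.pyRange ((k : Int) - 1) (-1) (-1)).foldl (outerB s P) (dlist s P n k)
        = dlist s P n 0 := by
  intro k
  induction k with
  | zero =>
    intro _
    rw [PySem.List.pyRange_neg_one_eq_nil (by omega)]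
    simp
  | succ k ih =>
    intro hk
    have hc : ((k + 1 : Nat) : Int) - 1 = (k : Int) := by push_cast; ring
    rw [hc, PySem.List.pyRange_neg_one_cons (by omega : (-1 : Int) < (k : Int)), List.foldl_cons,
      outerB_dlist s P n k (by omega)]
    exact ih (by omega)

-- ---- B-side: the trace of the worklist loop ----

def memoDown (s P : List Int) (n : Nat) : Nat → PySem.Dict Int Int
  | 0 => PySem.Dict.empty
  | c + 1 => (memoDown s P n c).insert ((n - 1 - c : Nat) : Int) (dval s P n (n - 1 - c))

theorem memoDown_get? (s P : List Int) (n : Nat) :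
    ∀ c, c ≤ n → ∀ x : Int, (memoDown s P n c).get? x
      = if (n : Int) - c ≤ x ∧ x < n then some (dval s P n x.toNat) else none := by
  intro c
  induction c with
  | zero =>
    intro _ x
    rw [if_neg (by omega)]
    simp [memoDown]
  | succ c ih =>
    intro hc x
    show ((memoDown s P n c).insert ((n - 1 - c : Nat) : Int) (dval s P n (n - 1 - c))).get? x = _
    rw [PySem.Dict.get?_insert, ih (by omega) x]
    have hcast : ((n - 1 - c : Nat) : Int) = (n : Int) - 1 - (c : Int) := by omega
    by_cases hx : x = ((n - 1 - c : Nat) : Int)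
    · rw [if_pos hx, if_pos (by omega)]
      subst hx
      rw [Int.toNat_natCast]
    · rw [if_neg hx]
      by_cases h1 : (n : Int) - c ≤ x ∧ x < n
      · rw [if_pos h1, if_pos (by omega)]
      · rw [if_neg h1, if_neg (by rw [hcast] at hx; omega)]

theorem loopB_nil (s P : List Int) (N : Int) (f : Nat) (m : PySem.Dict Int Int) :
    loopB s P N f [] m = m := by
  cases f <;> rfl

-- the compute branch evaluates exactly dval k when the memo already holds dval on (k, n)
theorem computeB (s P : List Int) (n k : Nat) (memo : PySem.Dict Int Int) (hk : k < n)
    (hm : ∀ j : Int, (k : Int) < j → j < n → memo.getD j 0 = dval s P n j.toNat) :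
    (PySem.List.pyRange ((k : Int) + 1) (n : Int) 1).foldl
      (fun b j =>
        let t := PySem.Dict.getD memo j 0 + PySem.List.pyGetD P (j - 1) 0
          - PySem.List.pyGetD P (k : Int) 0
          + PySem.Int.mod (PySem.List.pyGetD s j 0) (PySem.List.pyGetD s (k : Int) 0)
        if t > b then t else b)
      (if (k : Int) == (n : Int) - 1 then (0 : Int) else -1)
    = dval s P n k := by
  have hstep : (fun (b j : Int) =>
        let t := PySem.Dict.getD memo j 0 + PySem.List.pyGetD P (j - 1) 0
          - PySem.List.pyGetD P (k : Int) 0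
          + PySem.Int.mod (PySem.List.pyGetD s j 0) (PySem.List.pyGetD s (k : Int) 0)
        if t > b then t else b)
      = (fun (b j : Int) => max b (PySem.Dict.getD memo j 0 + PySem.List.pyGetD P (j - 1) 0
          - PySem.List.pyGetD P (k : Int) 0
          + PySem.Int.mod (PySem.List.pyGetD s j 0) (PySem.List.pyGetD s (k : Int) 0))) := by
    funext b j
    dsimp only
    rw [max_def]
    split_ifs <;> omega
  rw [hstep]
  rw [PySem.List.pyRange_one ((k : Int) + 1) (n : Int), List.foldl_map]
  rw [show ((n : Int) - ((k : Int) + 1)).toNat = n - 1 - k by omega]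
  rw [dval_eq_range_fold s P n k hk]
  have hinit : (if ((k : Int) == (n : Int) - 1) then (0 : Int) else -1)
      = (if k = n - 1 then (0 : Int) else -1) := by
    simp only [beq_iff_eq]
    split_ifs with h1 h2 h2 <;> first | rfl | omega
  rw [hinit]
  apply PySem.List.foldl_congr_mem
  intro acc t ht
  rw [List.mem_range] at ht
  rw [hm ((k : Int) + 1 + (t : Int)) (by omega) (by omega),
    show ((k : Int) + 1 + (t : Int)).toNat = k + 1 + t by omega,
    show (k : Int) + 1 + (t : Int) - 1 = ((k + t : Nat) : Int) by push_cast; ring,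
    show (k : Int) + 1 + (t : Int) = ((k + 1 + t : Nat) : Int) by push_cast; ring,
    PySem.List.pyGetD_natCast, PySem.List.pyGetD_natCast,
    PySem.List.pyGetD_natCast s, PySem.List.pyGetD_natCast s]

theorem descend_step (s P : List Int) (n k : Nat) (hn : 1 ≤ n) (hk : k ≤ n - 1) (f : Nat) :
    loopB s P (n : Int) (f + 1) ((List.range (k + 1)).map (fun m : Nat => (m : Int)))
        (memoDown s P n (n - 1 - k))
      = loopB s P (n : Int) f ((List.range k).map (fun m : Nat => (m : Int)))
        (memoDown s P n (n - k)) := by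
  have hstack : (List.range (k + 1)).map (fun m : Nat => (m : Int))
      = (List.range k).map (fun m : Nat => (m : Int)) ++ [(k : Int)] := by
    simp [List.range_succ]
  have hc1 : (memoDown s P n (n - 1 - k)).contains (k : Int) = false := by
    rw [PySem.Dict.contains_eq_isSome_get?, memoDown_get? s P n (n - 1 - k) (by omega) (k : Int),
      if_neg (by omega)]
    rfl
  have htodo : (PySem.List.pyRange ((k : Int) + 1) (n : Int) 1).filter
      (fun j => !(PySem.Dict.contains (memoDown s P n (n - 1 - k)) j)) = [] := by
    rw [List.filter_eq_nil_iff]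
    intro j hj
    rw [PySem.List.mem_pyRange_one] at hj
    rw [PySem.Dict.contains_eq_isSome_get?, memoDown_get? s P n (n - 1 - k) (by omega) j,
      if_pos (by omega)]
    simp
  have hm : ∀ j : Int, (k : Int) < j → j < (n : Int) →
      (memoDown s P n (n - 1 - k)).getD j 0 = dval s P n j.toNat := by
    intro j h1 h2
    rw [PySem.Dict.getD_eq_get?_getD, memoDown_get? s P n (n - 1 - k) (by omega) j,
      if_pos (by omega)]
    rfl
  have hins : (memoDown s P n (n - 1 - k)).insert (k : Int) (dval s P n k)
      = memoDown s P n (n - k) := by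
    rw [show n - k = (n - 1 - k) + 1 by omega]
    show _ = (memoDown s P n (n - 1 - k)).insert ((n - 1 - (n - 1 - k) : Nat) : Int)
      (dval s P n (n - 1 - (n - 1 - k)))
    rw [show n - 1 - (n - 1 - k) = k by omega]
  rw [hstack]
  simp only [loopB, List.getLast?_concat, List.dropLast_concat, hc1, htodo,
    Bool.false_eq_true, if_false, List.isEmpty_nil, Bool.not_true]
  rw [computeB s P n k (memoDown s P n (n - 1 - k)) (by omega) hm, hins]

theorem descend (s P : List Int) (n : Nat) (hn : 1 ≤ n) :
    ∀ k, k ≤ n - 1 → ∀ f,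
      loopB s P (n : Int) (f + (k + 2)) ((List.range (k + 1)).map (fun m : Nat => (m : Int)))
          (memoDown s P n (n - 1 - k))
        = memoDown s P n n := by
  intro k
  induction k with
  | zero =>
    intro hk f
    rw [show f + (0 + 2) = (f + 1) + 1 by omega,
      descend_step s P n 0 hn (by omega) (f + 1)]
    have h0 : (List.range 0).map (fun m : Nat => (m : Int)) = ([] : List Int) := by simp
    rw [h0, loopB_nil, show n - 0 = n by omega]
  | succ m ih =>
    intro hk f
    rw [show f + (m + 1 + 2) = (f + (m + 2)) + 1 by omega,
      descend_step s P n (m + 1) hn hk (f + (m + 2))]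
    have := ih (by omega) f
    rw [show n - 1 - m = n - (m + 1) by omega] at this
    exact this

theorem loopB_full (s P : List Int) (n : Nat) (hn : 1 ≤ n) :
    loopB s P (n : Int) (n + 4) [0] PySem.Dict.empty = memoDown s P n n := by
  by_cases h1 : n = 1
  · subst h1
    have h0 : [(0 : Int)] = (List.range 1).map (fun m : Nat => (m : Int)) := by simp
    rw [h0]
    exact descend s P 1 (by omega) 0 (by omega) 3
  · have hn2 : 2 ≤ n := by omega
    have hs : [(0 : Int)] = ([] : List Int) ++ [(0 : Int)] := rfl
    have hne : (PySem.List.pyRange ((0 : Int) + 1) (n : Int) 1).isEmpty = false := by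
      rw [List.isEmpty_eq_false_iff]
      intro hcon
      have := congrArg List.length hcon
      rw [PySem.List.length_pyRange_one] at this
      simp at this
      omega
    have key : ∀ F, loopB s P (n : Int) (F + 1) (([] : List Int) ++ [0]) PySem.Dict.empty
        = loopB s P (n : Int) F ((([] : List Int) ++ [0]) ++ PySem.List.pyRange ((0 : Int) + 1) (n : Int) 1) PySem.Dict.empty := by
      intro F
      simp only [loopB, List.getLast?_concat, List.dropLast_concat, PySem.Dict.contains_empty,
        Bool.false_eq_true, if_false, Bool.not_false, List.filter_true, hne, if_true]
    have hstack2 : (([] : List Int) ++ [(0 : Int)]) ++ PySem.List.pyRange ((0 : Int) + 1) (n : Int) 1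
        = (List.range n).map (fun m : Nat => (m : Int)) := by
      rw [zero_add, PySem.List.pyRange_one 1 (n : Int),
        show ((n : Int) - 1).toNat = n - 1 by omega]
      have hr : List.range n = 0 :: (List.range (n - 1)).map Nat.succ := by
        conv_lhs => rw [show n = (n - 1) + 1 by omega]
        exact List.range_succ_eq_map
      rw [hr, List.map_cons, List.map_map]
      simp only [List.nil_append, List.cons_append, Nat.cast_zero]
      congr 1
      apply List.map_congr_left
      intro m _
      simp only [Function.comp, Nat.succ_eq_add_one]
      push_cast
      ring
    rw [show n + 4 = (n + 3) + 1 by omega, hs, key (n + 3), hstack2]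
    have hd := descend s P n hn (n - 1) (by omega) 2
    rw [show (n - 1) + 1 = n by omega, show n - 1 - (n - 1) = 0 by omega,
      show 2 + ((n - 1) + 2) = n + 3 by omega] at hd
    exact hd

theorem find_max_permutation_value_spec : Claim_equal_find_max_permutation_value := by
  intro N A _ hpre
  obtain ⟨h1, h2, -⟩ := hpre
  unfold Spec_find_max_permutation_value
  obtain ⟨n, rfl⟩ : ∃ n : Nat, N = (n : Int) := ⟨N.toNat, by omega⟩
  have hn1 : 1 ≤ n := by exact_mod_cast h1
  have hlen : n ≤ A.length := by exact_mod_cast h2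
  simp only [find_max_permutation_value, find_max_permutation_value_alt]
  set s := PySem.List.sorted A (fun x => x) false with hs
  have hslen : n ≤ s.length := by rw [PySem.List.length_sorted]; exact hlen
  have hpreA : (PySem.List.pyRange 0 (n:Int) 1).foldl (fillF s) (List.replicate ((n:Int)).toNat 0)
      = scanSum 0 (s.take n) := by
    have h := fillA_spec s n hslen n le_rfl
    simpa using h
  have hpreB : ((PySem.List.slice s none (some (n:Int))).foldl psF ([], 0)).1
      = scanSum 0 (s.take n) := by
    rw [PySem.List.slice_to s (by omega), psF_spec]
    simp
  have hdp0 : PySem.List.pySetD (List.replicate ((n:Int)).toNat (-1 : Int)) ((n:Int) - 1) 0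
      = List.replicate (n - 1) (-1) ++ [0] := by
    rw [show ((n:Int) - 1) = ((n - 1 : Nat) : Int) by omega, PySem.List.pySetD_natCast]
    rw [show List.replicate ((n:Int)).toNat (-1 : Int) = List.replicate ((n-1)+1) (-1) by congr 1; omega]
    rw [List.replicate_succ', List.set_append]
    simp
  rw [hpreA, hpreB, hdp0]
  set P := scanSum 0 (s.take n) with hP
  have hbase : [(0 : Int)] = dlist s P n (n - 1) := by
    unfold dlist
    rw [show n - (n - 1) = 1 by omega]
    simp [dval_last s P n hn1]
  -- A's loop equals the suffix-list fold, which builds dlist 0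
  have hA : (PySem.List.pyRange ((n:Int) - 2) (-1) (-1)).foldl (outerA s P (n:Int))
        (List.replicate (n - 1) (-1) ++ [0])
      = dlist s P n 0 := by
    have hc : ((n - 1 : Nat) : Int) - 1 = (n:Int) - 2 := by omega
    rw [← hc, loop_eq s P n (n - 1) [0] (by simp; omega), hbase,
      Afold_dlist s P n (n - 1) le_rfl]
  rw [hA]
  -- B's loop produces the full memo
  have hB : loopB s P (n:Int) (((n:Int)).toNat + 4) [0] PySem.Dict.empty = memoDown s P n n := by
    rw [show ((n:Int)).toNat = n by omega]
    exact loopB_full s P n hn1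
  rw [hB]
  have hget : (memoDown s P n n).getD 0 0 = dval s P n 0 := by
    rw [PySem.Dict.getD_eq_get?_getD, memoDown_get? s P n n le_rfl 0, if_pos (by omega)]
    rfl
  rw [hget]
  have hA0 : PySem.List.pyGetD (dlist s P n 0) 0 0 = dval s P n 0 := by
    rw [PySem.List.pyGetD_zero, getD_dlist s P n 0 0 (by omega)]
  rw [hA0]
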